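-- pv_equiv track=rewrite | github.com/Fondamenti18/fondamenti-di-programmazione | students/1793692/homework01/program03.py | codifica
-- ===== SOURCE A (Python) =====
-- def codifica(chiave, testo):
--     chiaves=chiave.replace(' ', '')
--     chiaves=list(chiaves)
--     for x in reversed(range(len(chiaves))):
--         if chiaves[x].isupper():
--             del chiaves[x]
--     chiaves=chiaves[::-1]
--     chiavedis = []
--     for l in chiaves:
--         if l not in chiavedis:
--             chiavedis.append(l)
--     chiavedis=chiavedis[::-1]
--     chiaveord=sorted(chiavedis)
--     testol=list(testo)
--
--     codificata=[]
--     d = dict(zip(chiaveord, chiavedis))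
--     codificata=([d[n] if n in d else n for n in testol])
--     return "".join(codificata)
-- ===== SOURCE B (Python) =====
-- def codifica(chiave, testo):
--     # Build the substitution alphabet in one forward pass: skip spaces and
--     # uppercase letters; move-to-end on repeats, so later occurrences win
--     # (same last-occurrence order A gets via its two reversals).
--     chiavedis = []
--     for c in chiave:
--         if c == ' ' or c.isupper():
--             continue
--         chiavedis = [x for x in chiavedis if x != c] + [c]
--     d = dict(zip(sorted(chiavedis), chiavedis))
--     return ''.join(d.get(c, c) for c in testo)
-- ===== Notes on version B (the rewrite author's own statement) =====
-- stated objective: simpler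
-- what changed: Replaces A's four-stage pipeline (space-replace, reversed-index uppercase deletion, reverse, keep-first dedup, reverse again) with one forward pass over the key that filters spaces/uppercase and deduplicates by move-to-end, then one dict built from zip(sorted, list).
import Mathlib
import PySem

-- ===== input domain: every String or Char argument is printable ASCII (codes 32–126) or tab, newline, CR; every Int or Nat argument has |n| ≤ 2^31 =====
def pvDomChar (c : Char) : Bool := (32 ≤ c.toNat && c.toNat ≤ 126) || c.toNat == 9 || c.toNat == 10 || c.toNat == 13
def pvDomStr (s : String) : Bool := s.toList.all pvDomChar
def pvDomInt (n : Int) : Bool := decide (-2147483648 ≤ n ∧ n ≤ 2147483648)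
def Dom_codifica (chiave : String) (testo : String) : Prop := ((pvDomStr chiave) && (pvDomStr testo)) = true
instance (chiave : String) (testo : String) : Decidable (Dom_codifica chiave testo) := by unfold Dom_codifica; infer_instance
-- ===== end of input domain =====

-- B builds the substitution alphabet in one forward pass (filter + move-to-end dedup)
-- instead of A's space-replace, reversed-index uppercase deletion and double reversal.

-- ===== PORT A =====
def codifica (chiave : String) (testo : String) : String :=
  -- chiaves = list(chiave.replace(' ', ''))
  let chiaves0 : List Char := (PySem.Str.replace chiave " " "").toList
  -- for x in reversed(range(len(chiaves))): if chiaves[x].isupper(): del chiaves[x]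
  -- (x always indexes into the current list, so pyGetD / eraseIdx x.toNat are exact)
  let chiaves1 : List Char :=
    ((PySem.List.pyRange 0 (chiaves0.length : Int) 1).reverse).foldl
      (fun acc x =>
        if PySem.Chars.isupper (PySem.List.pyGetD acc x ' ') then acc.eraseIdx x.toNat else acc)
      chiaves0
  -- chiaves = chiaves[::-1]
  let chiaves2 : List Char := (PySem.List.slice? chiaves1 none none (-1)).getD []
  -- for l in chiaves: if l not in chiavedis: chiavedis.append(l)
  let chiavedis0 : List Char :=
    chiaves2.foldl (fun acc l => if l ∈ acc then acc else acc ++ [l]) []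
  -- chiavedis = chiavedis[::-1]
  let chiavedis : List Char := (PySem.List.slice? chiavedis0 none none (-1)).getD []
  -- chiaveord = sorted(chiavedis)
  let chiaveord : List Char := PySem.List.sorted chiavedis (fun c => c) false
  -- d = dict(zip(chiaveord, chiavedis))
  let d : PySem.Dict Char Char :=
    (chiaveord.zip chiavedis).foldl (fun d p => d.insert p.1 p.2) PySem.Dict.empty
  -- "".join([d[n] if n in d else n for n in testol])  (d[n] is guarded by 'n in d')
  String.ofList (testo.toList.map (fun n => match d.get? n with | some v => v | none => n))

-- ===== PORT B =====
def codifica_alt (chiave : String) (testo : String) : String :=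
  let chiavedis : List Char :=
    chiave.toList.foldl
      (fun acc c =>
        if c == ' ' || PySem.Chars.isupper c then acc
        else acc.filter (fun x => x != c) ++ [c])
      []
  let d : PySem.Dict Char Char :=
    ((PySem.List.sorted chiavedis (fun c => c) false).zip chiavedis).foldl
      (fun d p => d.insert p.1 p.2) PySem.Dict.empty
  String.ofList (testo.toList.map (fun c => d.getD c c))

-- ===== PRECONDITION & SPEC =====
def Spec_codifica (chiave : String) (testo : String) (out : String) : Prop := out = codifica_alt chiave testo
instance (chiave : String) (testo : String) (out : String) : Decidable (Spec_codifica chiave testo out) := by unfold Spec_codifica; infer_instance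

-- ===== CLAIM (what is proved, stated in full; the proofs are below) =====
def Claim_equal_codifica : Prop := ∀ (chiave : String) (testo : String), Dom_codifica chiave testo → Spec_codifica chiave testo (codifica chiave testo)

-- ===== LEMMAS AND PROOFS =====

-- chiave.replace(' ', '') is the space filter
lemma replace_space_go (fuel : Nat) : ∀ (l acc : List Char), l.length ≤ fuel →
    PySem.Chars.replace.go [' '] [] fuel l acc = acc.reverse ++ l.filter (fun c => !(c == ' ')) := by
  induction fuel with
  | zero => intro l acc h; simp at h; simp [h, PySem.Chars.replace.go]
  | succ n ih =>
    intro l acc h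
    cases l with
    | nil => simp [PySem.Chars.replace.go]
    | cons c t =>
      rw [PySem.Chars.replace.go]
      by_cases hc : c = ' '
      · subst hc
        simp only [List.isPrefixOf, BEq.refl, Bool.and_eq_true]
        simp only [List.length_cons] at h
        rw [ih _ _ (by simpa using Nat.le_of_succ_le_succ h)]
        simp
      · have : ([' '].isPrefixOf (c :: t)) = false := by
          simp [List.isPrefixOf]
          exact fun h => hc h.symm
        rw [this]
        simp only [Bool.false_eq_true, if_false]
        simp only [List.length_cons] at h
        rw [ih _ _ (Nat.le_of_succ_le_succ h)]
        simp [hc]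

lemma replace_space (s : String) :
    (PySem.Str.replace s " " "").toList = s.toList.filter (fun c => !(c == ' ')) := by
  rw [PySem.Str.toList_replace]
  show PySem.Chars.replace s.toList [' '] [] = _
  unfold PySem.Chars.replace
  simp only [List.isEmpty_cons, if_false, Bool.false_eq_true]
  rw [replace_space_go s.toList.length s.toList [] le_rfl]
  simp

-- the descending-index deletion loop is the not-uppercase filter
lemma delLoop (n : Nat) : ∀ (acc : List Char), n ≤ acc.length →
    ((List.range n).reverse).foldl
      (fun acc k => if PySem.Chars.isupper (acc.getD k ' ') then acc.eraseIdx k else acc) acc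
    = (acc.take n).filter (fun c => !PySem.Chars.isupper c) ++ acc.drop n := by
  induction n with
  | zero => intro acc h; simp
  | succ n ih =>
    intro acc h
    rw [List.range_succ, List.reverse_append, List.reverse_singleton]
    simp only [List.singleton_append, List.foldl_cons]
    have hn : n < acc.length := h
    have hget : acc.getD n ' ' = acc[n] := List.getD_eq_getElem acc ' ' hn
    have htake1 : acc.take (n+1) = acc.take n ++ [acc[n]] := by
      rw [List.take_add_one, List.getElem?_eq_getElem hn]; rfl
    by_cases hu : PySem.Chars.isupper acc[n]
    · rw [if_pos (by rw [hget]; exact hu)]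
      have hlen : n ≤ (acc.eraseIdx n).length := by
        rw [List.length_eraseIdx_of_lt hn]; omega
      rw [ih _ hlen, List.eraseIdx_eq_take_drop_succ]
      have htake : (acc.take n ++ acc.drop (n+1)).take n = acc.take n := by
        rw [List.take_append_of_le_length (by rw [List.length_take]; omega)]
        simp
      have hdrop : (acc.take n ++ acc.drop (n+1)).drop n = acc.drop (n+1) := by
        rw [List.drop_append_of_le_length (by rw [List.length_take]; omega)]
        simp
      rw [htake, hdrop, htake1, List.filter_append]
      simp [hu]
    · rw [if_neg (by rw [hget]; exact hu)]
      have hd : acc.drop n = acc[n] :: acc.drop (n+1) := List.drop_eq_getElem_cons hn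
      rw [ih _ hn.le, htake1, hd, List.filter_append]
      simp [hu]

-- the keep-first dedup fold, started from any accumulator
lemma pdedup_acc (ys : List Char) : ∀ (acc : List Char),
    ys.foldl (fun acc l => if l ∈ acc then acc else acc ++ [l]) acc
    = acc ++ (ys.foldl (fun acc l => if l ∈ acc then acc else acc ++ [l]) []).filter
        (fun x => decide (x ∉ acc)) := by
  induction ys with
  | nil => intro acc; simp
  | cons x ys ih =>
    intro acc
    simp only [List.foldl_cons]
    rw [ih (if x ∈ acc then acc else acc ++ [x])]
    conv_rhs => rw [show (if x ∈ ([] : List Char) then ([] : List Char) else [] ++ [x]) = [x] by simp]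
    rw [ih [x]]
    simp only [List.singleton_append, List.filter_cons]
    by_cases hx : x ∈ acc
    · rw [if_pos hx]
      have hdx : decide (x ∉ acc) = false := by simp [hx]
      simp only [hdx, Bool.false_eq_true, if_false]
      rw [List.filter_filter]
      congr 1
      apply List.filter_congr
      intro y hy
      by_cases hyx : y = x
      · subst hyx; simp [hx]
      · simp [hyx]
    · rw [if_neg hx]
      have : (decide (x ∉ acc)) = true := by simp [hx]
      simp only [this, if_pos]
      rw [List.filter_filter]
      rw [List.append_assoc]
      congr 1
      simp only [List.singleton_append]
      congr 1
      apply List.filter_congr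
      intro y hy
      by_cases hyx : y = x
      · subst hyx; simp
      · simp [hyx, List.mem_append]

-- keep-first dedup of a cons
lemma dedup_cons (c : Char) (ys : List Char) :
    (c :: ys).foldl (fun acc l => if l ∈ acc then acc else acc ++ [l]) []
    = c :: (ys.foldl (fun acc l => if l ∈ acc then acc else acc ++ [l]) []).filter (fun x => x != c) := by
  simp only [List.foldl_cons, List.not_mem_nil, List.nil_append]
  rw [show (if False then ([] : List Char) else [c]) = [c] by simp]
  rw [pdedup_acc ys [c]]
  simp only [List.singleton_append]
  congr 1
  apply List.filter_congr
  intro y _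
  simp [bne, beq_eq_decide]

-- reverse ∘ keep-first-dedup ∘ reverse = forward move-to-end fold
lemma mte_eq_revdedup (l : List Char) :
    l.foldl (fun acc c => acc.filter (fun x => x != c) ++ [c]) []
    = (l.reverse.foldl (fun acc c => if c ∈ acc then acc else acc ++ [c]) []).reverse := by
  induction l using List.reverseRecOn with
  | nil => simp
  | append_singleton l c ih =>
    rw [List.foldl_append, List.foldl_cons, List.foldl_nil, ih]
    rw [List.reverse_append, List.reverse_singleton, List.singleton_append]
    rw [dedup_cons]
    rw [List.reverse_cons, List.filter_reverse]

-- B's skip-fold is the fold over the filtered list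
lemma skip_fold (l : List Char) : ∀ (init : List Char),
    l.foldl (fun acc c => if c == ' ' || PySem.Chars.isupper c then acc
                          else acc.filter (fun x => x != c) ++ [c]) init
    = (l.filter (fun c => !(c == ' ' || PySem.Chars.isupper c))).foldl
        (fun acc c => acc.filter (fun x => x != c) ++ [c]) init := by
  induction l with
  | nil => intro init; simp
  | cons c t ih =>
    intro init
    simp only [List.foldl_cons, List.filter_cons]
    cases h : (c == ' ' || PySem.Chars.isupper c)
    · simp only [Bool.false_eq_true, if_false, Bool.not_false, if_true, List.foldl_cons]
      exact ih _
    · simp only [if_true, Bool.not_true, Bool.false_eq_true, if_false]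
      exact ih _

-- the two builds of the key alphabet agree
lemma chiavedis_eq (chiave : String) :
    (PySem.List.slice?
        (((PySem.List.slice?
              (((PySem.List.pyRange 0 (((PySem.Str.replace chiave " " "").toList).length : Int) 1).reverse).foldl
                (fun acc x =>
                  if PySem.Chars.isupper (PySem.List.pyGetD acc x ' ') then acc.eraseIdx x.toNat else acc)
                ((PySem.Str.replace chiave " " "").toList))
              none none (-1)).getD []).foldl
          (fun acc l => if l ∈ acc then acc else acc ++ [l]) [])
        none none (-1)).getD []
    = chiave.toList.foldl
        (fun acc c =>
          if c == ' ' || PySem.Chars.isupper c then acc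
          else acc.filter (fun x => x != c) ++ [c]) [] := by
  have hfun : (fun (acc : List Char) (k : Nat) =>
        if PySem.Chars.isupper (PySem.List.pyGetD acc (0 + (k : Int)) ' ') then acc.eraseIdx (0 + (k : Int)).toNat else acc)
      = (fun acc k => if PySem.Chars.isupper (acc.getD k ' ') then acc.eraseIdx k else acc) := by
    funext acc k
    simp [PySem.List.pyGetD_natCast]
  set c0 := (PySem.Str.replace chiave " " "").toList with hc0
  have hrange : (PySem.List.pyRange 0 (c0.length : Int) 1).reverse
      = ((List.range c0.length).reverse).map (fun k : Nat => 0 + (k : Int)) := by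
    rw [PySem.List.pyRange_one, List.map_reverse]
    simp
  have h1 : ((PySem.List.pyRange 0 (c0.length : Int) 1).reverse).foldl
      (fun acc x =>
        if PySem.Chars.isupper (PySem.List.pyGetD acc x ' ') then acc.eraseIdx x.toNat else acc) c0
      = c0.filter (fun c => !PySem.Chars.isupper c) := by
    rw [hrange, List.foldl_map, hfun, delLoop c0.length c0 le_rfl]
    simp
  rw [h1]
  rw [show ∀ l : List Char, (PySem.List.slice? l none none (-1)).getD [] = l.reverse from
    fun l => by rw [PySem.List.slice?_none_none_neg_one]; rfl]
  rw [skip_fold, mte_eq_revdedup]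
  rw [show ∀ l : List Char, (PySem.List.slice? l none none (-1)).getD [] = l.reverse from
    fun l => by rw [PySem.List.slice?_none_none_neg_one]; rfl]
  have hfil : c0.filter (fun c => !PySem.Chars.isupper c)
      = chiave.toList.filter (fun c => !(c == ' ' || PySem.Chars.isupper c)) := by
    rw [hc0, replace_space, List.filter_filter]
    apply List.filter_congr
    intro c _
    simp [Bool.not_or, Bool.and_comm]
  rw [hfil]

-- ===== VERDICT (by name: the statement is the Claim_ definition above) =====
theorem codifica_spec : Claim_equal_codifica := by
  intro chiave testo _
  unfold Spec_codifica
  simp only [codifica, codifica_alt]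
  rw [chiavedis_eq chiave]
  congr 1
  apply List.map_congr_left
  intro n _
  unfold PySem.Dict.getD
  rcases hd : PySem.Dict.get? _ n with _ | v
  · simp only [Option.getD_none]
  · simp only [Option.getD_some]
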